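-- pv_equiv track=rewrite | github.com/Jehan-Yang/CodeSignal | jiaocha.py | solution
-- ===== SOURCE A (Python) =====
-- def solution(a):
--     b = []
--     if len(a)%2 == 0:
--         for i in range(int(len(a)/2)):
--             b.append(a[i])
--             b.append(a[len(a)-1-i])
--     else:
--         for i in range(int(len(a)/2)):
--             b.append(a[i])
--             b.append(a[len(a)-1-i])
--         b.append(a[int(len(a)/2)])
--
--     for i in range(len(b)-1):
--         if(b[i]>=b[i+1]):
--             return False
--     return True
-- ===== SOURCE B (Python) =====
-- def solution(a):
--     # two-pointer walk: emit a[lo], a[hi] alternately (front first), track previous value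
--     lo, hi = 0, len(a) - 1
--     prev = None
--     front = True
--     for _ in range(len(a)):
--         if front:
--             cur = a[lo]
--             lo += 1
--         else:
--             cur = a[hi]
--             hi -= 1
--         if prev is not None and prev >= cur:
--             return False
--         prev = cur
--         front = not front
--     return True
-- ===== Notes on version B (the rewrite author's own statement) =====
-- stated objective: simpler
-- what changed: B drops A's auxiliary interleaved list entirely: a single two-pointer walk (lo from the front, hi from the back, alternating) emits the interleaved values on the fly and compares each against the previous one, instead of A's build-the-list loop followed by a separate adjacent-pairs scan; removing the list build gives a constant-factor speedup.
import Mathlib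
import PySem

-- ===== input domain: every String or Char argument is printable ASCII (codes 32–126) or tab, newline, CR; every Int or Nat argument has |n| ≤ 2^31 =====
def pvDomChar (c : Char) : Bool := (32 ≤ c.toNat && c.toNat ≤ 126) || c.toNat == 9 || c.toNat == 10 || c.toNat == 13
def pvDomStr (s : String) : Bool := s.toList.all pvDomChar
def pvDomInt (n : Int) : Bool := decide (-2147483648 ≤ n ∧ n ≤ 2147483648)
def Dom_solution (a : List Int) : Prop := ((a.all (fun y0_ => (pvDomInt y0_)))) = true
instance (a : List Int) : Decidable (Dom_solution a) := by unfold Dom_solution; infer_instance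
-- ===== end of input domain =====

-- B replaces A's build-the-interleaved-list-then-scan with a single two-pointer
-- walk tracking only the previous emitted value (objective: simpler, no auxiliary list).

-- ===== PORT A =====
def solution (a : List Int) : Bool :=
  let n : Int := a.length
  let b : List Int :=
    if n % 2 == 0 then
      (PySem.List.pyRange 0 (n / 2) 1).foldl
        (fun b i => (b ++ [PySem.List.pyGetD a i 0]) ++ [PySem.List.pyGetD a (n - 1 - i) 0]) []
    else
      ((PySem.List.pyRange 0 (n / 2) 1).foldl
        (fun b i => (b ++ [PySem.List.pyGetD a i 0]) ++ [PySem.List.pyGetD a (n - 1 - i) 0]) [])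
        ++ [PySem.List.pyGetD a (n / 2) 0]
  (PySem.List.pyRange 0 ((b.length : Int) - 1) 1).all
    (fun i => !(PySem.List.pyGetD b i 0 ≥ PySem.List.pyGetD b (i + 1) 0))

-- ===== PORT B =====
def solution_altGo (a : List Int) : Nat → Int → Int → Option Int → Bool → Bool
  | 0, _, _, _, _ => true
  | k + 1, lo, hi, prev, front =>
    let cur := if front then PySem.List.pyGetD a lo 0 else PySem.List.pyGetD a hi 0
    let lo' := if front then lo + 1 else lo
    let hi' := if front then hi else hi - 1
    match prev with
    | some p => if p ≥ cur then false else solution_altGo a k lo' hi' (some cur) (!front)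
    | none => solution_altGo a k lo' hi' (some cur) (!front)

def solution_alt (a : List Int) : Bool :=
  solution_altGo a a.length 0 ((a.length : Int) - 1) none true

-- ===== PRECONDITION & SPEC =====
def Spec_solution (a : List Int) (out : Bool) : Prop := out = solution_alt a
instance (a : List Int) (out : Bool) : Decidable (Spec_solution a out) := by unfold Spec_solution; infer_instance

-- ===== CLAIM (what is proved, stated in full; the proofs are below) =====
def Claim_equal_solution : Prop := ∀ (a : List Int), Dom_solution a → Spec_solution a (solution a)

-- ===== LEMMAS AND PROOFS =====

/-- The interleaved list (front, back, front, back, …) by closed index formula. -/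
def ilv (a : List Int) : List Int :=
  (List.range a.length).map (fun j =>
    if j % 2 = 0 then a.getD (j / 2) 0 else a.getD (a.length - 1 - j / 2) 0)

/-- Strict-increase check of a list continuing from an optional previous value. -/
def chainCheck : Option Int → List Int → Bool
  | _, [] => true
  | prev, x :: xs =>
    (match prev with | some p => decide (p < x) | none => true) && chainCheck (some x) xs

theorem ilv_length (a : List Int) : (ilv a).length = a.length := by
  simp [ilv]

theorem ilv_getElem (a : List Int) (j : Nat) (hj : j < a.length) :
    (ilv a)[j]'(by simpa [ilv_length] using hj) =
      if j % 2 = 0 then a.getD (j / 2) 0 else a.getD (a.length - 1 - j / 2) 0 := by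
  simp [ilv]

/-- A's build loop produces the first `2*m` elements of `ilv a`. -/
theorem foldA_eq_take (a : List Int) (m : Nat) (hm : m ≤ a.length / 2) :
    ((List.range m).map (fun k => (0 : Int) + (k : Nat))).foldl
      (fun b i => (b ++ [PySem.List.pyGetD a i 0])
        ++ [PySem.List.pyGetD a ((a.length : Int) - 1 - i) 0]) []
      = (ilv a).take (2 * m) := by
  induction m with
  | zero => simp
  | succ m ih =>
    have hm' : m ≤ a.length / 2 := by omega
    have hlen : 2 * m + 1 < a.length := by omega
    rw [List.range_succ, List.map_append, List.foldl_append, ih hm']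
    have h1 : PySem.List.pyGetD a ((0 : Int) + (m : Nat)) 0 = a.getD m 0 := by
      simp [PySem.List.pyGetD_natCast]
    have hcast : ((a.length : Int) - 1 - ((0 : Int) + (m : Nat))) = ((a.length - 1 - m : Nat) : Int) := by
      omega
    have h2 : PySem.List.pyGetD a ((a.length : Int) - 1 - ((0 : Int) + (m : Nat))) 0
        = a.getD (a.length - 1 - m) 0 := by
      rw [hcast, PySem.List.pyGetD_natCast]
    have ht1 : (ilv a).take (2 * m + 1) = (ilv a).take (2 * m) ++ [a.getD m 0] := by
      rw [List.take_succ]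
      have hlt : 2 * m < (ilv a).length := by rw [ilv_length]; omega
      rw [List.getElem?_eq_getElem hlt, ilv_getElem a (2 * m) (by omega)]
      have e1 : (2 * m) % 2 = 0 := by omega
      have e2 : (2 * m) / 2 = m := by omega
      rw [if_pos e1, e2]
      simp only [Option.toList_some, List.getD_eq_getElem?_getD]
    have ht2 : (ilv a).take (2 * m + 2) = (ilv a).take (2 * m + 1) ++ [a.getD (a.length - 1 - m) 0] := by
      rw [List.take_succ]
      have hlt : 2 * m + 1 < (ilv a).length := by rw [ilv_length]; omega
      rw [List.getElem?_eq_getElem hlt, ilv_getElem a (2 * m + 1) (by omega)]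
      have e3 : (2 * m + 1) % 2 = 1 := by omega
      have e4 : (2 * m + 1) / 2 = m := by omega
      rw [if_neg (by omega), e4]
      simp only [Option.toList_some, List.getD_eq_getElem?_getD]
    simp only [List.map_cons, List.map_nil, List.foldl_cons, List.foldl_nil, h1, h2]
    have h2m2 : 2 * (m + 1) = 2 * m + 2 := by omega
    rw [h2m2, ht2, ht1]

/-- The list A builds is exactly `ilv a`. -/
theorem bA_eq_ilv (a : List Int) :
    (if ((a.length : Int) % 2 == 0) then
      (PySem.List.pyRange 0 ((a.length : Int) / 2) 1).foldl
        (fun b i => (b ++ [PySem.List.pyGetD a i 0])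
          ++ [PySem.List.pyGetD a ((a.length : Int) - 1 - i) 0]) []
    else
      ((PySem.List.pyRange 0 ((a.length : Int) / 2) 1).foldl
        (fun b i => (b ++ [PySem.List.pyGetD a i 0])
          ++ [PySem.List.pyGetD a ((a.length : Int) - 1 - i) 0]) [])
        ++ [PySem.List.pyGetD a ((a.length : Int) / 2) 0]) = ilv a := by
  have hdiv : (((a.length : Int) / 2 - 0).toNat) = a.length / 2 := by omega
  have hrange : PySem.List.pyRange 0 ((a.length : Int) / 2) 1
      = (List.range (a.length / 2)).map (fun k => (0 : Int) + (k : Nat)) := by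
    rw [PySem.List.pyRange_one, hdiv]
  rw [hrange]
  by_cases hpar : a.length % 2 = 0
  · have hcond : (((a.length : Int) % 2 == 0) : Bool) = true := by
      simp; omega
    rw [if_pos (by simp [hcond])]
    rw [foldA_eq_take a (a.length / 2) (le_refl _)]
    have : 2 * (a.length / 2) = a.length := by omega
    rw [this, ← ilv_length a, List.take_length]
  · have hcond : (((a.length : Int) % 2 == 0) : Bool) = false := by
      simp; omega
    rw [if_neg (by simp [hcond])]
    rw [foldA_eq_take a (a.length / 2) (le_refl _)]
    have h2m : 2 * (a.length / 2) = a.length - 1 := by omega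
    have hmid : PySem.List.pyGetD a ((a.length : Int) / 2) 0 = a.getD (a.length / 2) 0 := by
      have : ((a.length : Int) / 2) = ((a.length / 2 : Nat) : Int) := by omega
      rw [this, PySem.List.pyGetD_natCast]
    rw [h2m, hmid]
    have hlt : a.length - 1 < (ilv a).length := by rw [ilv_length]; omega
    have := List.take_succ (l := ilv a) (i := a.length - 1)
    rw [List.getElem?_eq_getElem hlt, ilv_getElem a (a.length - 1) (by omega)] at this
    have hpar' : (a.length - 1) % 2 = 0 := by omega
    have hd : (a.length - 1) / 2 = a.length / 2 := by omega
    rw [hpar', hd] at this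
    norm_num at this
    have hn : a.length - 1 + 1 = a.length := by omega
    rw [hn] at this
    simp only [List.getD_eq_getElem?_getD]
    rw [← this, ← ilv_length a, List.take_length]

theorem chainCheck_some (l : List Int) : ∀ p, chainCheck (some p) l = decide (List.IsChain (· < ·) (p :: l)) := by
  induction l with
  | nil => intro p; simp [chainCheck]
  | cons x xs ih =>
    intro p
    rw [chainCheck, ih x]
    simp [List.isChain_cons_cons]

theorem chainCheck_none (l : List Int) : chainCheck none l = decide (List.IsChain (· < ·) l) := by
  cases l with
  | nil => simp [chainCheck]
  | cons x xs => rw [chainCheck, chainCheck_some]; simp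

/-- A's scan loop is the chain check. -/
theorem allCheck_eq_chainCheck (b : List Int) :
    (PySem.List.pyRange 0 ((b.length : Int) - 1) 1).all
      (fun i => !(PySem.List.pyGetD b i 0 ≥ PySem.List.pyGetD b (i + 1) 0))
      = chainCheck none b := by
  rw [chainCheck_none]
  have hdiv : (((b.length : Int) - 1 - 0).toNat) = b.length - 1 := by omega
  rw [PySem.List.pyRange_one, hdiv]
  rw [List.all_map]
  rcases Bool.eq_false_or_eq_true (decide (List.IsChain (· < ·) b)) with hch | hch
  case inl =>
    rw [hch]
    rw [decide_eq_true_iff, List.isChain_iff_getElem] at hch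
    apply List.all_eq_true.mpr
    intro i hi
    rw [List.mem_range] at hi
    simp only [Function.comp]
    have h1 : PySem.List.pyGetD b ((0 : Int) + (i : Nat)) 0 = b.getD i 0 := by
      simp [PySem.List.pyGetD_natCast]
    have h2 : PySem.List.pyGetD b ((0 : Int) + (i : Nat) + 1) 0 = b.getD (i + 1) 0 := by
      have : ((0 : Int) + (i : Nat) + 1) = ((i + 1 : Nat) : Int) := by omega
      rw [this, PySem.List.pyGetD_natCast]
    rw [h1, h2, List.getD_eq_getElem b 0 (by omega), List.getD_eq_getElem b 0 (by omega)]
    simpa using hch i (by omega)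
  case inr =>
    rw [hch]
    rw [decide_eq_false_iff_not, List.isChain_iff_getElem] at hch
    push_neg at hch
    obtain ⟨i, hi, hbad⟩ := hch
    apply List.all_eq_false.mpr
    refine ⟨i, List.mem_range.mpr (by omega), ?_⟩
    simp only [Function.comp]
    have h1 : PySem.List.pyGetD b ((0 : Int) + (i : Nat)) 0 = b.getD i 0 := by
      simp [PySem.List.pyGetD_natCast]
    have h2 : PySem.List.pyGetD b ((0 : Int) + (i : Nat) + 1) 0 = b.getD (i + 1) 0 := by
      have : ((0 : Int) + (i : Nat) + 1) = ((i + 1 : Nat) : Int) := by omega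
      rw [this, PySem.List.pyGetD_natCast]
    rw [h1, h2, List.getD_eq_getElem b 0 (by omega), List.getD_eq_getElem b 0 (by omega)]
    simpa using hbad

/-- B's two-pointer walk, started `j` steps in, is the chain check of the rest of `ilv a`. -/
theorem goB_eq_chainCheck (a : List Int) : ∀ (k j : Nat) (prev : Option Int),
    k = a.length - j → j ≤ a.length →
    solution_altGo a k (((j + 1) / 2 : Nat) : Int) ((a.length : Int) - 1 - ((j / 2 : Nat) : Int))
      prev (decide (j % 2 = 0)) = chainCheck prev ((ilv a).drop j) := by
  intro k
  induction k with
  | zero =>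
    intro j prev hk hj
    have : j = a.length := by omega
    subst this
    rw [List.drop_of_length_le (by rw [ilv_length])]
    cases prev <;> simp [solution_altGo, chainCheck]
  | succ k ih =>
    intro j prev hk hj
    have hjlt : j < a.length := by omega
    have hdropj : (ilv a).drop j = (ilv a)[j]'(by rw [ilv_length]; omega) :: (ilv a).drop (j + 1) := by
      rw [List.drop_eq_getElem_cons (by rw [ilv_length]; omega)]
    have hcur : (if decide (j % 2 = 0) then
          PySem.List.pyGetD a (((j + 1) / 2 : Nat) : Int) 0
        else PySem.List.pyGetD a ((a.length : Int) - 1 - ((j / 2 : Nat) : Int)) 0)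
        = (ilv a)[j]'(by rw [ilv_length]; omega) := by
      rw [ilv_getElem a j hjlt]
      by_cases hpar : j % 2 = 0
      · have h12 : (j + 1) / 2 = j / 2 := by omega
        rw [if_pos (show (decide (j % 2 = 0)) = true by simp [hpar])]
        rw [h12, if_pos hpar, PySem.List.pyGetD_natCast]
      · have hcast : ((a.length : Int) - 1 - ((j / 2 : Nat) : Int))
            = ((a.length - 1 - j / 2 : Nat) : Int) := by omega
        rw [if_neg (by simp [hpar])]
        rw [if_neg hpar, hcast, PySem.List.pyGetD_natCast]
    have hstep : solution_altGo a (k + 1) (((j + 1) / 2 : Nat) : Int)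
        ((a.length : Int) - 1 - ((j / 2 : Nat) : Int)) prev (decide (j % 2 = 0))
        = ((match prev with | some p => decide (p < (ilv a)[j]'(by rw [ilv_length]; omega)) | none => true)
            && solution_altGo a k ((((j + 1) + 1) / 2 : Nat) : Int)
              ((a.length : Int) - 1 - (((j + 1) / 2 : Nat) : Int))
              (some ((ilv a)[j]'(by rw [ilv_length]; omega))) (decide ((j + 1) % 2 = 0))) := by
      simp only [solution_altGo]
      simp only [hcur]
      have hlo' : (if decide (j % 2 = 0) then (((j + 1) / 2 : Nat) : Int) + 1
          else (((j + 1) / 2 : Nat) : Int)) = ((((j + 1) + 1) / 2 : Nat) : Int) := by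
        by_cases hpar : j % 2 = 0
        · simp only [hpar, decide_true, if_true]; omega
        · simp only [decide_eq_true_eq, if_neg hpar]; omega
      have hhi' : (if decide (j % 2 = 0) then ((a.length : Int) - 1 - ((j / 2 : Nat) : Int))
          else ((a.length : Int) - 1 - ((j / 2 : Nat) : Int)) - 1)
          = ((a.length : Int) - 1 - (((j + 1) / 2 : Nat) : Int)) := by
        by_cases hpar : j % 2 = 0
        · simp only [hpar, decide_true, if_true]; omega
        · simp only [decide_eq_true_eq, if_neg hpar]; omega
      have hfr' : (!decide (j % 2 = 0)) = decide ((j + 1) % 2 = 0) := by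
        by_cases hpar : j % 2 = 0 <;> simp [hpar] <;> omega
      rw [hlo', hhi', hfr']
      cases prev with
      | none => simp
      | some p =>
        by_cases hge : p ≥ (ilv a)[j]'(by rw [ilv_length]; omega)
        · simp [hge, not_lt.mpr hge]
        · simp [hge, lt_of_not_ge hge]
    rw [hstep, ih (j + 1) _ (by omega) (by omega), hdropj]
    simp only [chainCheck]

-- ===== VERDICT (by name: the statement is the Claim_ definition above) =====
theorem solution_spec : Claim_equal_solution := by
  intro a _
  unfold Spec_solution solution solution_alt
  simp only []
  rw [bA_eq_ilv a, allCheck_eq_chainCheck]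
  have h := goB_eq_chainCheck a a.length 0 none (by omega) (by omega)
  simp only [Nat.zero_div, Nat.cast_zero, Int.sub_zero, decide_true] at h
  norm_num at h ⊢
  rw [h]
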